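-- pv_equiv track=rewrite | github.com/paripatel55/Technical-Interview-Prep | Codesignal/Question 2s/charCascade.py | charCascade
-- ===== SOURCE A (Python) =====
-- def charCascade(arr):
--     resStr = ""
--     # find max length word
--     maxLen = max(len(word) for word in arr)
--     # loop through from 0 to max length word
--     for i in range(maxLen):
--         for word in range(len(arr)):
--             if i < len(arr[word]):
--                 resStr += arr[word][i]
--     return resStr
-- ===== SOURCE B (Python) =====
-- def charCascade(arr):
--     # Row-major pass collecting (column, char) pairs, then a stable sort by
--     # column index; ties keep row order, so this is the column-by-column cascade.
--     pairs = [(i, ch) for word in arr for i, ch in enumerate(word)]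
--     pairs.sort(key=lambda p: p[0])
--     return ''.join(ch for _, ch in pairs)
-- ===== Notes on version B (the rewrite author's own statement) =====
-- stated objective: alternative
-- what changed: Replaces A's column-major nested index loops (outer over positions, inner over words with a bounds check) by one row-major pass collecting (position, char) pairs followed by a stable sort on position, exploiting sort stability to keep row order within a column.
import Mathlib
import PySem

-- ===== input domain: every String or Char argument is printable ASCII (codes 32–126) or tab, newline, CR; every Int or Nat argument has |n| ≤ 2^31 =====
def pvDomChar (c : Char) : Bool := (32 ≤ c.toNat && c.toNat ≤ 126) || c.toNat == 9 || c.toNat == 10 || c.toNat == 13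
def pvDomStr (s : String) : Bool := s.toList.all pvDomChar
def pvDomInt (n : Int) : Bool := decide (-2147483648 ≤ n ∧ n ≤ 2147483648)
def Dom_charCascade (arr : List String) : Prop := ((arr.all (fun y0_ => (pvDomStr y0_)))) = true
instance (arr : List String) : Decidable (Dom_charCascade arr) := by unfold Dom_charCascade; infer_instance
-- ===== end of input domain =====

-- B replaces the column-major index loops by a row-major pass collecting (position, char)
-- pairs and a stable sort on position; return value only (A mutates nothing).

-- ===== PORT A =====
-- literal port of A: maxLen = max(len(word) for word in arr) (none = ValueError on [],
-- excluded by Pre_), then the two nested index loops appending arr[word][i] when i < len(arr[word]).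
def charCascade (arr : List String) : String :=
  match PySem.List.max? (arr.map (fun w => (w.toList.length : Int))) (fun y => y) with
  | none => ""   -- Python: max() raises ValueError here; excluded by Pre_charCascade
  | some maxLen =>
    String.ofList <|
      (PySem.List.pyRange 0 maxLen 1).foldl (fun res i =>
        (PySem.List.pyRange 0 (PySem.List.len arr) 1).foldl (fun res j =>
          if i < (((PySem.List.pyGetD arr j "").toList.length : Int)) then
            res ++ [PySem.List.pyGetD (PySem.List.pyGetD arr j "").toList i ' ']
          else res) res)
        ([] : List Char)

-- ===== PORT B =====
-- port of Source B: pairs = [(i, ch) for word in arr for i, ch in enumerate(word)];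
-- pairs.sort(key=lambda p: p[0]) (stable); ''.join(ch for _, ch in pairs).
def charCascade_alt (arr : List String) : String :=
  let pairs := arr.flatMap (fun w => PySem.List.enumerate w.toList 0)
  let sortedPairs := PySem.List.sorted pairs (fun p => p.1)
  String.ofList (sortedPairs.map (fun p => p.2))

-- ===== PRECONDITION & SPEC =====
-- Pre_ excludes exactly the empty list, on which A's max() raises ValueError.
def Pre_charCascade (arr : List String) : Prop := arr ≠ []
instance (arr : List String) : Decidable (Pre_charCascade arr) := by unfold Pre_charCascade; infer_instance
def pvWitness_charCascade : List String := (["ab", "c"])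

def Spec_charCascade (arr : List String) (out : String) : Prop := out = charCascade_alt arr
instance (arr : List String) (out : String) : Decidable (Spec_charCascade arr out) := by unfold Spec_charCascade; infer_instance

-- ===== CLAIM (what is proved, stated in full; the proofs are below) =====
def Claim_equal_charCascade : Prop := ∀ (arr : List String), Dom_charCascade arr → Pre_charCascade arr → Spec_charCascade arr (charCascade arr)

-- ===== LEMMAS AND PROOFS =====

-- column i of the rows: the characters arr[j][i] for the rows long enough, in row order
def pvCol (ls : List (List Char)) (n : Nat) : List Char := ls.filterMap (fun l => l[n]?)

-- maximum row length
def pvMaxLen (ls : List (List Char)) : Nat := ls.foldr (fun l m => max l.length m) 0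

theorem pvLen_le_maxLen (ls : List (List Char)) (l : List Char) (h : l ∈ ls) :
    l.length ≤ pvMaxLen ls := by
  induction ls with
  | nil => simp at h
  | cons a t ih =>
    simp only [pvMaxLen, List.foldr_cons, List.mem_cons] at *
    rcases h with h | h
    · subst h; omega
    · have := ih h; omega

-- ===== A-side: A's result is the concatenation of the columns 0 .. maxLen − 1 =====

-- the body of A's inner loop, as a fold over the words themselves
theorem pvInnerFold (i : Int) (hi : 0 ≤ i) :
    ∀ (arr : List String) (res : List Char),
      arr.foldl (fun res w => if i < ((w.toList.length : Int)) then
          res ++ [PySem.List.pyGetD w.toList i ' '] else res) res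
        = res ++ pvCol (arr.map String.toList) i.toNat := by
  intro arr
  induction arr with
  | nil => intro res; simp [pvCol]
  | cons a t ih =>
    intro res
    simp only [List.foldl_cons, List.map_cons, pvCol, List.filterMap_cons]
    by_cases h : i < (a.toList.length : Int)
    · have hlt : i.toNat < a.toList.length := by omega
      have hv : PySem.List.pyGetD a.toList i ' ' = a.toList[i.toNat] :=
        PySem.List.pyGetD_eq_getElem a.toList ' ' hi (by exact_mod_cast h)
      rw [if_pos h, hv, ih]
      simp [pvCol, List.getElem?_eq_getElem hlt]
    · have hge : a.toList[i.toNat]? = none := by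
        rw [List.getElem?_eq_none_iff]; omega
      rw [if_neg h, ih]
      simp [pvCol, hge]

-- the inner loop of A appends column i
theorem pvInner (arr : List String) (i : Int) (hi : 0 ≤ i) (res : List Char) :
    (PySem.List.pyRange 0 (PySem.List.len arr) 1).foldl (fun res j =>
        if i < (((PySem.List.pyGetD arr j "").toList.length : Int)) then
          res ++ [PySem.List.pyGetD (PySem.List.pyGetD arr j "").toList i ' ']
        else res) res
      = res ++ pvCol (arr.map String.toList) i.toNat := by
  have h0 : (PySem.List.pyRange 0 (PySem.List.len arr) 1).foldl (fun res j =>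
        if i < (((PySem.List.pyGetD arr j "").toList.length : Int)) then
          res ++ [PySem.List.pyGetD (PySem.List.pyGetD arr j "").toList i ' ']
        else res) res
      = arr.foldl (fun res w => if i < ((w.toList.length : Int)) then
          res ++ [PySem.List.pyGetD w.toList i ' '] else res) res :=
    PySem.List.foldl_pyRange_zero_pyGetD (f := fun res w =>
      if i < ((w.toList.length : Int)) then
        res ++ [PySem.List.pyGetD w.toList i ' '] else res) (xs := arr) (d := "") (init := res)
  rw [h0]
  exact pvInnerFold i hi arr res

-- the outer loop concatenates the columns 0 .. maxLen − 1
theorem pvOuterGen (C : Nat → List Char) (g : List Char → Int → List Char)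
    (hg : ∀ res i, 0 ≤ i → g res i = res ++ C i.toNat) :
    ∀ (n : Nat) (res : List Char),
      (PySem.List.pyRange 0 ((n : Nat) : Int) 1).foldl g res
        = res ++ (List.range n).flatMap C := by
  intro n
  induction n with
  | zero =>
    intro res
    rw [PySem.List.pyRange_one_eq_nil (by omega)]
    simp
  | succ n ih =>
    intro res
    have hc : (((n + 1 : Nat)) : Int) = ((n : Nat) : Int) + 1 := by push_cast; ring
    rw [hc, PySem.List.pyRange_one_succ_right (by omega), List.foldl_append]
    simp only [List.foldl_cons, List.foldl_nil]
    rw [ih, hg _ _ (by omega), List.range_succ]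
    simp [List.flatMap_append]

theorem pvFoldlCastMax (t : List String) : ∀ x : Nat,
    (t.map (fun w => (w.toList.length : Int))).foldl max ((x : Nat) : Int)
      = (((t.map (fun w => w.toList.length)).foldl max x : Nat) : Int) := by
  induction t with
  | nil => intro x; simp
  | cons a u ih =>
    intro x
    simp only [List.map_cons, List.foldl_cons, ← Nat.cast_max]
    exact ih (max x a.toList.length)

theorem pvFoldlMax (l : List Nat) : ∀ x : Nat, l.foldl max x = max x (l.foldr max 0) := by
  induction l with
  | nil => intro x; simp
  | cons a t ih =>
    intro x
    simp only [List.foldl_cons, List.foldr_cons, ih]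
    omega

-- the maximum computed by A's max() call
theorem pvMax_eq (arr : List String) (h : arr ≠ []) :
    PySem.List.max? (arr.map (fun w => (w.toList.length : Int))) (fun y => y)
      = some ((pvMaxLen (arr.map String.toList) : Int)) := by
  cases arr with
  | nil => exact absurd rfl h
  | cons a t =>
    simp only [List.map_cons]
    rw [PySem.List.max?_id_cons, pvFoldlCastMax, pvFoldlMax]
    congr 1
    have h2 : ∀ (s : List String),
        pvMaxLen (s.map String.toList) = (s.map (fun w => w.toList.length)).foldr max 0 := by
      intro s; induction s with
      | nil => simp [pvMaxLen]
      | cons b u ihu => simp only [pvMaxLen, List.map_cons, List.foldr_cons] at *; omega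
    rw [show pvMaxLen (a.toList :: List.map String.toList t)
          = max a.toList.length (pvMaxLen (List.map String.toList t)) from rfl, h2 t]

-- ===== B-side: stable sort by position = concatenation of the key-fibers =====

-- inserting x into a key-sorted list appends it at the END of its own key-fiber
theorem pvFiberInsertBy (i : Int) (x : Int × Char) :
    ∀ acc : List (Int × Char), acc.Pairwise (fun a b => a.1 ≤ b.1) →
      (PySem.List.insertBy (fun a b => decide (a.1 < b.1)) x acc).filter (fun p => p.1 == i)
        = if x.1 = i then acc.filter (fun p => p.1 == i) ++ [x]
          else acc.filter (fun p => p.1 == i) := by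
  intro acc
  induction acc with
  | nil =>
    intro _
    by_cases hx : x.1 = i <;>
      simp [PySem.List.insertBy, hx]
  | cons y ys ih =>
    intro hp
    have hys : ys.Pairwise (fun a b => a.1 ≤ b.1) := hp.tail
    have hyle : ∀ p ∈ ys, y.1 ≤ p.1 := fun p hm => (List.pairwise_cons.mp hp).1 p hm
    have hstep : PySem.List.insertBy (fun a b => decide (a.1 < b.1)) x (y :: ys)
        = if x.1 < y.1 then x :: y :: ys
          else y :: PySem.List.insertBy (fun a b => decide (a.1 < b.1)) x ys := by
      simp [PySem.List.insertBy]
    rw [hstep]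
    by_cases hlt : x.1 < y.1
    · rw [if_pos hlt]
      by_cases hx : x.1 = i
      · -- every element of y :: ys has key ≥ y.1 > x.1 = i, so its i-fiber is empty
        have hnone : (y :: ys).filter (fun p => p.1 == i) = [] := by
          rw [List.filter_eq_nil_iff]
          intro p hm
          simp only [beq_iff_eq]
          rcases List.mem_cons.mp hm with h | h
          · subst h; omega
          · have := hyle p h; omega
        rw [if_pos hx, hnone, List.filter_cons]
        simp [hx, hnone]
      · rw [if_neg hx, List.filter_cons]
        simp only [show ((x.1 == i) = false) from by simpa using hx, Bool.false_eq_true,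
          if_false]
    · rw [if_neg hlt, List.filter_cons, List.filter_cons, ih hys]
      by_cases hx : x.1 = i <;> by_cases hy : (y.1 == i) = true <;>
        simp [hx, hy]

-- stability: the i-fiber of the sorted list is the i-fiber of the original, in order
theorem pvFiberSorted (xs : List (Int × Char)) (i : Int) :
    (PySem.List.sorted xs (fun p => p.1)).filter (fun p => p.1 == i)
      = xs.filter (fun p => p.1 == i) := by
  induction xs using List.reverseRecOn with
  | nil => simp [PySem.List.sorted_eq_foldl_insertBy]
  | append_singleton ys x ih =>
    have hsp : (PySem.List.sorted ys (fun p => (p.1 : Int))).Pairwise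
        (fun a b => a.1 ≤ b.1) := PySem.List.sorted_pairwise ys (fun p => p.1)
    rw [PySem.List.sorted_eq_foldl_insertBy, List.foldl_append, List.foldl_cons,
      List.foldl_nil, ← PySem.List.sorted_eq_foldl_insertBy,
      pvFiberInsertBy i x _ hsp, List.filter_append, ih]
    by_cases hx : x.1 = i <;> simp [hx]

-- a key-sorted list with keys in [0, n) is the concatenation of its fibers 0 .. n−1
theorem pvDecomp : ∀ (n : Nat) (L : List (Int × Char)),
    L.Pairwise (fun a b => a.1 ≤ b.1) → (∀ p ∈ L, 0 ≤ p.1 ∧ p.1 < (n : Int)) →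
    (List.range n).flatMap (fun i : Nat => L.filter (fun p => p.1 == (i : Int))) = L := by
  intro n
  induction n with
  | zero =>
    intro L _ hb
    have : L = [] := by
      cases L with
      | nil => rfl
      | cons p t => have := hb p (by simp); omega
    simp [this]
  | succ n ih =>
    intro L hp hb
    have hsplit := List.takeWhile_append_dropWhile (p := fun p => decide (p.1 < (n : Int))) (l := L)
    set L1 := L.takeWhile (fun p => decide (p.1 < (n : Int))) with hL1
    set L2 := L.dropWhile (fun p => decide (p.1 < (n : Int))) with hL2
    have hL1mem : ∀ p ∈ L1, p.1 < (n : Int) := by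
      intro p hm
      have := List.mem_takeWhile_imp hm
      simpa using this
    have hL2mem : ∀ p ∈ L2, (n : Int) ≤ p.1 := by
      cases hL2c : L2 with
      | nil => simp
      | cons q t =>
        have hq : ¬ (q.1 < (n : Int)) := by
          have := List.head?_dropWhile_not (p := fun p => decide (p.1 < (n : Int))) (l := L)
          rw [← hL2, hL2c] at this
          simpa using this
        have hp2 : L2.Pairwise (fun a b => a.1 ≤ b.1) :=
          hp.sublist (List.dropWhile_sublist _)
        rw [hL2c] at hp2
        intro p hm
        rcases List.mem_cons.mp hm with h | h
        · subst h; omega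
        · have := (List.pairwise_cons.mp hp2).1 p h; omega
    have hmemL1 : ∀ p ∈ L1, p ∈ L := fun p hm => (List.takeWhile_sublist _).subset hm
    have hmemL2 : ∀ p ∈ L2, p ∈ L := fun p hm => (List.dropWhile_sublist _).subset hm
    -- the fibers below n of L are those of L1; the fiber at n is exactly L2
    have hfib : ∀ i : Nat, i < n →
        L.filter (fun p => p.1 == (i : Int)) = L1.filter (fun p => p.1 == (i : Int)) := by
      intro i hi
      rw [← hsplit, List.filter_append]
      have : L2.filter (fun p => p.1 == (i : Int)) = [] := by
        rw [List.filter_eq_nil_iff]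
        intro p hm
        have := hL2mem p hm
        simp only [beq_iff_eq]; omega
      simp [this]
    have hfibn : L.filter (fun p => p.1 == (n : Int)) = L2 := by
      rw [← hsplit, List.filter_append]
      have h1 : L1.filter (fun p => p.1 == (n : Int)) = [] := by
        rw [List.filter_eq_nil_iff]
        intro p hm
        have := hL1mem p hm
        simp only [beq_iff_eq]; omega
      have h2 : L2.filter (fun p => p.1 == (n : Int)) = L2 := by
        rw [List.filter_eq_self]
        intro p hm
        have h3 := hL2mem p hm
        have h4 := (hb p (hmemL2 p hm)).2
        simp only [beq_iff_eq]
        push_cast at *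
        omega
      simp [h1, h2]
    rw [List.range_succ, List.flatMap_append]
    have hrec : (List.range n).flatMap (fun i : Nat => L.filter (fun p => p.1 == (i : Int))) = L1 := by
      have : ∀ i ∈ List.range n,
          L.filter (fun p => p.1 == (i : Int)) = L1.filter (fun p => p.1 == (i : Int)) := by
        intro i hi; exact hfib i (List.mem_range.mp hi)
      rw [List.flatMap_congr this]
      exact ih L1 (hp.sublist (List.takeWhile_sublist _))
        (fun p hm => ⟨(hb p (hmemL1 p hm)).1, hL1mem p hm⟩)
    rw [hrec]
    simp [hfibn, hsplit]

-- the i-fiber of one enumerated word: its character at position i, if any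
theorem pvEnumFiber (l : List Char) : ∀ (s i : Int),
    (PySem.List.enumerate l s).filter (fun p => p.1 == i)
      = if h : 0 ≤ i - s ∧ (i - s).toNat < l.length
        then [(i, l[(i - s).toNat])] else [] := by
  induction l with
  | nil => intro s i; simp [PySem.List.enumerate_nil]
  | cons c t ih =>
    intro s i
    rw [PySem.List.enumerate_cons, List.filter_cons, ih (s + 1) i]
    by_cases hsi : s = i
    · subst hsi
      have h0 : 0 ≤ (s : Int) - s ∧ ((s : Int) - s).toNat < (c :: t).length := by
        constructor <;> simp
      have h1 : ¬ (0 ≤ s - (s + 1) ∧ (s - (s + 1)).toNat < t.length) := by omega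
      rw [dif_pos h0, dif_neg h1]
      simp
    · have hne : ((s, c).1 == i) = false := by simpa using hsi
      simp only [hne, Bool.false_eq_true, if_false]
      by_cases hc : 0 ≤ i - (s + 1) ∧ (i - (s + 1)).toNat < t.length
      · have hc' : 0 ≤ i - s ∧ (i - s).toNat < (c :: t).length := by
          simp only [List.length_cons]; omega
        rw [dif_pos hc, dif_pos hc']
        have hk : (i - s).toNat = (i - (s + 1)).toNat + 1 := by omega
        simp [hk]
      · have hc' : ¬ (0 ≤ i - s ∧ (i - s).toNat < (c :: t).length) := by
          simp only [List.length_cons]; omega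
        rw [dif_neg hc, dif_neg hc']

-- the i-fiber of all the pairs is column i, tagged with i
theorem pvFiberP (arr : List String) (i : Nat) :
    (arr.flatMap (fun w => PySem.List.enumerate w.toList 0)).filter
        (fun p => p.1 == (i : Int))
      = (pvCol (arr.map String.toList) i).map (fun c => ((i : Int), c)) := by
  induction arr with
  | nil => simp [pvCol]
  | cons a t ih =>
    simp only [List.flatMap_cons, List.filter_append, List.map_cons, pvCol,
      List.filterMap_cons] at *
    rw [ih, pvEnumFiber a.toList 0 (i : Int)]
    by_cases h : 0 ≤ (i : Int) - 0 ∧ ((i : Int) - 0).toNat < a.toList.length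
    · have hi : i < a.toList.length := by omega
      have : ((i : Int) - 0).toNat = i := by omega
      rw [dif_pos h]
      simp [List.getElem?_eq_getElem hi]
    · have hi : ¬ i < a.toList.length := by omega
      have : a.toList[i]? = none := by rw [List.getElem?_eq_none_iff]; omega
      rw [dif_neg h]
      simp [this]

-- every collected pair has its key in [0, maxLen)
theorem pvKeysBounded (arr : List String) (p : Int × Char)
    (hm : p ∈ arr.flatMap (fun w => PySem.List.enumerate w.toList 0)) :
    0 ≤ p.1 ∧ p.1 < ((pvMaxLen (arr.map String.toList) : Nat) : Int) := by
  rcases List.mem_flatMap.mp hm with ⟨w, hw, hpw⟩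
  rcases (PySem.List.mem_enumerate_iff w.toList 0 p).mp hpw with ⟨k, hk, hpk⟩
  have hlen : w.toList.length ≤ pvMaxLen (arr.map String.toList) :=
    pvLen_le_maxLen _ _ (List.mem_map.mpr ⟨w, hw, rfl⟩)
  subst hpk
  simp only [zero_add]
  omega

-- B's sorted pair list, projected to its characters, is the concatenation of the columns
theorem pvAltChars (arr : List String) :
    (PySem.List.sorted (arr.flatMap (fun w => PySem.List.enumerate w.toList 0))
        (fun p => p.1)).map (fun p => p.2)
      = (List.range (pvMaxLen (arr.map String.toList))).flatMap
          (pvCol (arr.map String.toList)) := by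
  set P := arr.flatMap (fun w => PySem.List.enumerate w.toList 0) with hP
  set n := pvMaxLen (arr.map String.toList) with hn
  set S := PySem.List.sorted P (fun p => p.1) with hS
  have hpair : S.Pairwise (fun a b => a.1 ≤ b.1) :=
    PySem.List.sorted_pairwise P (fun p => p.1)
  have hbound : ∀ p ∈ S, 0 ≤ p.1 ∧ p.1 < (n : Int) := by
    intro p hm
    have : p ∈ P := (PySem.List.mem_sorted P (fun q => q.1) false p).mp hm
    exact pvKeysBounded arr p this
  have hdec := pvDecomp n S hpair hbound
  calc S.map (fun p => p.2)
      = ((List.range n).flatMap (fun i : Nat => S.filter (fun p => p.1 == (i : Int)))).map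
          (fun p => p.2) := by rw [hdec]
    _ = (List.range n).flatMap (fun i : Nat =>
          (S.filter (fun p => p.1 == (i : Int))).map (fun p => p.2)) := by
          rw [List.map_flatMap]
    _ = (List.range n).flatMap (fun i : Nat =>
          (P.filter (fun p => p.1 == (i : Int))).map (fun p => p.2)) := by
          apply List.flatMap_congr; intro i _
          rw [hS, pvFiberSorted P (i : Int)]
    _ = (List.range n).flatMap (pvCol (arr.map String.toList)) := by
          apply List.flatMap_congr; intro i _
          rw [hP, pvFiberP arr i, List.map_map]
          simp

-- ===== VERDICT (by name: the statement is the Claim_ definition above) =====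
theorem charCascade_spec : Claim_equal_charCascade := by
  intro arr _ hpre
  unfold Spec_charCascade charCascade charCascade_alt
  rw [pvMax_eq arr hpre]
  simp only
  rw [pvOuterGen (pvCol (arr.map String.toList)) _
        (fun res i hi => pvInner arr i hi res) (pvMaxLen (arr.map String.toList)) []]
  rw [← pvAltChars arr]
  simp
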